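-- pv_equiv track=rewrite | github.com/Anisha007/DS_Algo_practise | recursion/delete_mid_of_stack.py | del_mid_stack_2
-- ===== SOURCE A (Python) =====
-- def del_mid_stack_2(stack_list, pos):
--     if pos==1:
--         stack_list.pop(0)
--         return stack_list
--     else:
--         ele = stack_list.pop(0)
--         stack_list = del_mid_stack_2(stack_list, pos-1)
--         stack_list.insert(0, ele)
--         return stack_list
-- ===== SOURCE B (Python) =====
-- def del_mid_stack_2(stack_list, pos):
--     temp = []
--     while pos != 1:
--         temp.append(stack_list.pop(0))
--         pos -= 1
--     stack_list.pop(0)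
--     while temp:
--         stack_list.insert(0, temp.pop())
--     return stack_list
-- ===== Notes on version B (the rewrite author's own statement) =====
-- stated objective: alternative
-- what changed: Replaces A's recursion (pop head / recurse on pos-1 / reinsert head) with an explicit iterative two-phase loop over an auxiliary stack: move the first pos-1 elements to temp, delete the target, then push temp back.
import Mathlib
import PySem

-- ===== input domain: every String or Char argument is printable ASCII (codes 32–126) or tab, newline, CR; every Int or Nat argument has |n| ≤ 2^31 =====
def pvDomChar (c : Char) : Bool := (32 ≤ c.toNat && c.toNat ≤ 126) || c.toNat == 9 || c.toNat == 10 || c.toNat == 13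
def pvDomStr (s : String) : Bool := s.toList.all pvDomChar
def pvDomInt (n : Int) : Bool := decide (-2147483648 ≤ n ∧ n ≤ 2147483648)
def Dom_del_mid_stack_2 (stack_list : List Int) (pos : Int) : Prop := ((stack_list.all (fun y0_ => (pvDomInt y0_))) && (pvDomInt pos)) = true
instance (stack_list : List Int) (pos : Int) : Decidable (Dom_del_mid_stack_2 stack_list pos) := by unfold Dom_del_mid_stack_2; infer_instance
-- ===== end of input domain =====

-- B replaces A's recursion with an explicit iterative auxiliary-stack two-phase loop
-- (alternative decomposition, same cost); both Pythons mutate stack_list identically,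
-- the theorems are about the return value.


-- ===== PORT A =====
-- pop(0) = take the head, insert(0, ele) = cons; the recursion on pos-1 runs down the list,
-- so structural recursion on the list is the literal shape of A.  On [] Python's pop raises
-- (excluded by Pre_); the port returns [] there.
def del_mid_stack_2 : List Int → Int → List Int
  | [], _ => []
  | x :: xs, pos => if pos == 1 then xs else x :: del_mid_stack_2 xs (pos - 1)

-- ===== PORT B =====
-- phase 1: while pos != 1: temp.append(stack_list.pop(0)); pos -= 1
-- returns (stack_list, temp); on [] Python's pop raises (excluded by Pre_), the port stops.
def bMoveOut : List Int → Int → List Int → List Int × List Int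
  | s, pos, temp =>
    if pos == 1 then (s, temp)
    else match s with
      | [] => ([], temp)
      | x :: xs => bMoveOut xs (pos - 1) (temp ++ [x])
termination_by s _ _ => s.length

-- phase 2: while temp: stack_list.insert(0, temp.pop())
def bPushBack : List Int → List Int → List Int
  | [], s => s
  | x :: xs, s => bPushBack ((x :: xs).dropLast) ((x :: xs).getLast! :: s)
termination_by temp _ => temp.length
decreasing_by simp [List.length_dropLast]

def del_mid_stack_2_alt (stack_list : List Int) (pos : Int) : List Int :=
  let st := bMoveOut stack_list pos []
  -- st.1.tail is stack_list.pop(0); on [] Python raises (excluded by Pre_)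
  bPushBack st.2 st.1.tail

-- ===== PRECONDITION & SPEC =====
-- Pre_: exactly the inputs where Python A returns (for pos < 1 the recursion empties the
-- list and pops from []; for pos > len it pops from [] as well: IndexError either way).
def Pre_del_mid_stack_2 (stack_list : List Int) (pos : Int) : Prop :=
  1 ≤ pos ∧ pos ≤ stack_list.length
instance (stack_list : List Int) (pos : Int) : Decidable (Pre_del_mid_stack_2 stack_list pos) := by unfold Pre_del_mid_stack_2; infer_instance
def pvWitness_del_mid_stack_2 : List Int × Int := ([4, 7, 9], 2)

def Spec_del_mid_stack_2 (stack_list : List Int) (pos : Int) (out : List Int) : Prop := out = del_mid_stack_2_alt stack_list pos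
instance (stack_list : List Int) (pos : Int) (out : List Int) : Decidable (Spec_del_mid_stack_2 stack_list pos out) := by unfold Spec_del_mid_stack_2; infer_instance

-- ===== CLAIM (what is proved, stated in full; the proofs are below) =====
def Claim_equal_del_mid_stack_2 : Prop := ∀ (stack_list : List Int) (pos : Int), Dom_del_mid_stack_2 stack_list pos → Pre_del_mid_stack_2 stack_list pos → Spec_del_mid_stack_2 stack_list pos (del_mid_stack_2 stack_list pos)

-- ===== LEMMAS AND PROOFS =====

-- A computes take (pos-1) ++ drop pos on inputs where it returns.
theorem del_mid_stack_2_eq_take_drop (stack_list : List Int) (pos : Int)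
    (h1 : 1 ≤ pos) (h2 : pos ≤ stack_list.length) :
    del_mid_stack_2 stack_list pos =
      stack_list.take (pos - 1).toNat ++ stack_list.drop pos.toNat := by
  induction stack_list generalizing pos with
  | nil => simp at h2; omega
  | cons x xs ih =>
      by_cases hp : pos = 1
      · subst hp; simp [del_mid_stack_2]
      · have h1' : 1 ≤ pos - 1 := by omega
        have h2' : pos - 1 ≤ (xs.length : Int) := by
          simp [List.length_cons] at h2; omega
        have htn : (pos - 1).toNat = (pos - 1 - 1).toNat + 1 := by omega
        have htp : pos.toNat = (pos - 1).toNat + 1 := by omega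
        simp only [del_mid_stack_2]
        rw [if_neg (by simpa using hp), ih (pos - 1) h1' h2', htn, htp]
        simp
        omega

-- pushing temp back one element at a time prepends temp.
theorem bPushBack_eq (temp s : List Int) : bPushBack temp s = temp ++ s := by
  induction temp, s using bPushBack.induct with
  | case1 s => rw [bPushBack]; rfl
  | case2 x xs s ih =>
      rw [bPushBack, ih]
      have h := List.dropLast_append_getLast (List.cons_ne_nil x xs)
      conv_rhs => rw [show x :: xs ++ s = (x :: xs) ++ s from rfl, ← h]
      rw [List.append_assoc]
      rfl

-- phase-1 invariant: with 1 ≤ pos ≤ |s|, the loop splits s at pos-1.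
theorem bMoveOut_eq (s : List Int) : ∀ (pos : Int) (temp : List Int),
    1 ≤ pos → pos ≤ s.length →
    bMoveOut s pos temp = (s.drop (pos - 1).toNat, temp ++ s.take (pos - 1).toNat) := by
  induction s with
  | nil => intro pos temp h1 h2; simp at h2; omega
  | cons x xs ih =>
      intro pos temp h1 h2
      rw [bMoveOut]
      by_cases hp : pos = 1
      · subst hp; simp
      · rw [if_neg (by simpa using hp)]
        have h2' : pos - 1 ≤ (xs.length : Int) := by
          simp [List.length_cons] at h2; omega
        rw [ih (pos - 1) (temp ++ [x]) (by omega) h2']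
        have : (pos - 1).toNat = (pos - 1 - 1).toNat + 1 := by omega
        rw [this]
        simp

theorem del_mid_stack_2_spec : Claim_equal_del_mid_stack_2 := by
  intro stack_list pos _ hpre
  obtain ⟨h1, h2⟩ := hpre
  unfold Spec_del_mid_stack_2 del_mid_stack_2_alt
  rw [del_mid_stack_2_eq_take_drop stack_list pos h1 h2,
      bMoveOut_eq stack_list pos [] h1 h2]
  rw [bPushBack_eq, List.tail_drop]
  have h : (pos - 1).toNat + 1 = pos.toNat := by omega
  rw [h]
  simp
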